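-- pv_equiv track=rewrite | github.com/SyloAlex/Actividades_Algoritmos | ejercicios_evaluaciones/parcial1.py | get_discount7
-- ===== SOURCE A (Python) =====
-- def get_discount7(id):
--     id_check = int(str(id)[-3:])
--     discount7 = False
--     for number in range(id_check):
--         if number * (number + 1) == id_check:
--             discount7 = True
--             break
--
--     return discount7
-- ===== SOURCE B (Python) =====
-- import math
--
-- def get_discount7(id):
--     id_check = int(str(id)[-3:])
--     if id_check < 1:
--         return False
--     d = 1 + 4 * id_check
--     s = math.isqrt(d)
--     return s * s == d
-- ===== Notes on version B (the rewrite author's own statement) =====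
-- stated objective: faster
-- what changed: Replaces the linear scan over range(id_check) searching for a number whose product with its successor equals id_check by a closed-form constant-time test: id_check is such a product iff four times id_check plus one is a perfect square (checked with math.isqrt).
import Mathlib
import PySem

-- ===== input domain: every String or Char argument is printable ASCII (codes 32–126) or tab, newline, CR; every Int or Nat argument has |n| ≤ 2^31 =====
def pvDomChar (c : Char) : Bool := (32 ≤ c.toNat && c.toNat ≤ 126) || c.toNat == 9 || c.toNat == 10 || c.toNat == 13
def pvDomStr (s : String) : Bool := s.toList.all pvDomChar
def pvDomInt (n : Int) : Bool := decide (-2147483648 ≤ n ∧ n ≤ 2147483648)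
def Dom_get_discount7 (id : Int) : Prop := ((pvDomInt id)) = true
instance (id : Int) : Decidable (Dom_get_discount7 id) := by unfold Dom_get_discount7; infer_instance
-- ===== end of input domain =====

-- B replaces A's linear scan for n with n*(n+1)==id_check by the O(1) perfect-square test on 1+4*id_check.

-- ===== PORT A =====
-- id_check = int(str(id)[-3:]); the parse never fails on str(id)[-3:], so getD 0 is unreachable padding.
def pvIdCheck (id : Int) : Int :=
  (PySem.Int.ofChars? (PySem.List.slice (PySem.Int.toChars id) (some (-3)) none)).getD 0

-- the for-loop with break: returns True at the first n with n*(n+1)==id_check, else False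
def pvLoopA (k : Int) : List Int → Bool
  | [] => false
  | n :: rest => if n * (n + 1) == k then true else pvLoopA k rest

def get_discount7 (id : Int) : Bool :=
  let id_check := pvIdCheck id
  pvLoopA id_check (PySem.List.pyRange 0 id_check 1)

-- ===== PORT B =====
def get_discount7_alt (id : Int) : Bool :=
  let id_check := pvIdCheck id
  if id_check < 1 then false
  else
    let d := 1 + 4 * id_check
    let s : Int := (Nat.sqrt d.toNat : Int)  -- math.isqrt(d), d > 0 here
    s * s == d

-- ===== PRECONDITION & SPEC =====
def Spec_get_discount7 (id : Int) (out : Bool) : Prop := out = get_discount7_alt id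
instance (id : Int) (out : Bool) : Decidable (Spec_get_discount7 id out) := by unfold Spec_get_discount7; infer_instance

-- ===== CLAIM (what is proved, stated in full; the proofs are below) =====
def Claim_equal_get_discount7 : Prop := ∀ (id : Int), Dom_get_discount7 id → Spec_get_discount7 id (get_discount7 id)

-- ===== LEMMAS AND PROOFS =====

theorem pvLoopA_iff (k : Int) (l : List Int) :
    pvLoopA k l = true ↔ ∃ n ∈ l, n * (n + 1) = k := by
  induction l with
  | nil => simp [pvLoopA]
  | cons n rest ih =>
    by_cases h : n * (n + 1) = k
    · simp [pvLoopA, h]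
    · simp [pvLoopA, h, ih]

theorem pv_exists_iff_square (k : Int) (hk : 1 ≤ k) :
    (∃ n, (0 ≤ n ∧ n < k) ∧ n * (n + 1) = k) ↔
      ((Nat.sqrt (1 + 4 * k).toNat : Int) * (Nat.sqrt (1 + 4 * k).toNat : Int) = 1 + 4 * k) := by
  constructor
  · rintro ⟨n, ⟨hn0, _⟩, hnk⟩
    set m := n.toNat with hm
    have hn : n = (m : Int) := by omega
    have hkm : k = ((m * (m + 1) : Nat) : Int) := by push_cast; rw [← hn]; omega
    have hd : (1 + 4 * k).toNat = (2 * m + 1) ^ 2 := by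
      have : (1 + 4 * k) = (((2 * m + 1) ^ 2 : Nat) : Int) := by
        push_cast; rw [hkm]; push_cast; ring
      omega
    rw [hd, Nat.sqrt_eq', hkm]
    push_cast
    ring
  · intro hs
    set s := Nat.sqrt (1 + 4 * k).toNat with hsdef
    have hss : s * s = 1 + 4 * k.toNat := by
      have h1 : ((s * s : Nat) : Int) = 1 + 4 * k := by push_cast; exact hs
      omega
    have hodd : s % 2 = 1 := by
      rcases Nat.even_or_odd s with he | ho
      · obtain ⟨t, ht⟩ := he
        have : s * s = 4 * (t * t) := by rw [ht]; ring
        omega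
      · obtain ⟨t, ht⟩ := ho
        omega
    obtain ⟨m, hm⟩ : ∃ m, s = 2 * m + 1 := ⟨s / 2, by omega⟩
    rw [hm] at hss
    have h2 : 4 * (m * (m + 1)) + 1 = 4 * k.toNat + 1 := by
      have h3 : (2 * m + 1) * (2 * m + 1) = 4 * (m * (m + 1)) + 1 := by ring
      omega
    have hmk : m * (m + 1) = k.toNat := by omega
    have hm1 : 1 ≤ m := by
      rcases Nat.eq_zero_or_pos m with h0 | h
      · rw [h0] at hmk; omega
      · exact h
    have hlt : m < m * (m + 1) := by nlinarith
    refine ⟨(m : Int), ⟨by positivity, by omega⟩, ?_⟩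
    have h4 : ((m * (m + 1) : Nat) : Int) = k := by omega
    push_cast at h4
    linarith [h4]

theorem pv_main (k : Int) :
    pvLoopA k (PySem.List.pyRange 0 k 1) =
      (if k < 1 then false
       else ((Nat.sqrt (1 + 4 * k).toNat : Int) * (Nat.sqrt (1 + 4 * k).toNat : Int) == 1 + 4 * k)) := by
  by_cases h : k < 1
  · rw [PySem.List.pyRange_one_eq_nil (by omega)]
    simp [pvLoopA, h]
  · rw [if_neg h]
    push Not at h
    rcases Bool.eq_false_or_eq_true (pvLoopA k (PySem.List.pyRange 0 k 1)) with hb | hb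
    · rw [hb]
      symm
      rw [beq_iff_eq, ← pv_exists_iff_square k h]
      rw [pvLoopA_iff] at hb
      simpa [PySem.List.mem_pyRange_one] using hb
    · rw [hb]
      symm
      rw [Bool.eq_false_iff, ne_eq, beq_iff_eq, ← pv_exists_iff_square k h]
      rw [← Bool.not_eq_true, pvLoopA_iff] at hb
      simpa [PySem.List.mem_pyRange_one] using hb

-- ===== VERDICT (by name: the statement is the Claim_ definition above) =====
theorem get_discount7_spec : Claim_equal_get_discount7 := by
  intro id _
  show get_discount7 id = get_discount7_alt id
  exact pv_main (pvIdCheck id)
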